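-- pv_equiv track=rewrite | github.com/dhruvdivecha/Advent-of-code-2025 | day7/solution.py | partTwo
-- ===== SOURCE A (Python) =====
-- def partTwo(grid):
--     from functools import lru_cache
--
--     start_row, start_col = next((r, line.find('S')) for r, line in enumerate(grid) if 'S' in line)
--
--     @lru_cache(maxsize=None)
--     def count_timelines(row, col):
--         # If particle has moved off the grid
--         if row >= len(grid):
--             return 1
--
--         cell = grid[row][col]
--
--         if cell == '^':
--             # Particle splits: count timelines for both left and right paths
--             left = count_timelines(row + 1, col - 1) if col > 0 else 0
--             right = count_timelines(row + 1, col + 1) if col < len(grid[0]) - 1 else 0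
--             return left + right
--         else:
--             # Particle continues straight down
--             return count_timelines(row + 1, col)
--
--     # Start one row below S
--     total_timelines = count_timelines(start_row + 1, start_col)
--     return total_timelines
-- ===== SOURCE B (Python) =====
-- def partTwo(grid):
--     start_row, start_col = next((r, line.find('S')) for r, line in enumerate(grid) if 'S' in line)
--     width = len(grid[0])
--     # dp[col] = number of timelines for a particle entering the current row at col;
--     # start from the notional row below the grid, where every column counts 1.
--     dp = [1] * width
--     for row in reversed(range(start_row + 1, len(grid))):
--         line = grid[row]
--         dp = [(dp[col - 1] if col > 0 else 0) + (dp[col + 1] if col < width - 1 else 0)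
--               if col < len(line) and line[col] == '^' else dp[col]
--               for col in range(width)]
--     return dp[start_col]
-- ===== Notes on version B (the rewrite author's own statement) =====
-- stated objective: alternative
-- what changed: Replaces A's memoized top-down recursion per (row,col) cell with a bottom-up row-by-row DP: one array of per-column timeline counts is swept upward from below the grid to the row under 'S'.
-- outside the precondition, e.g. on partTwo(['ab', 'xxS']): A returns 1, B raises IndexError; on partTwo(['S^', '..', 'x']): A returns 1, B returns 1
import Mathlib
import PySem

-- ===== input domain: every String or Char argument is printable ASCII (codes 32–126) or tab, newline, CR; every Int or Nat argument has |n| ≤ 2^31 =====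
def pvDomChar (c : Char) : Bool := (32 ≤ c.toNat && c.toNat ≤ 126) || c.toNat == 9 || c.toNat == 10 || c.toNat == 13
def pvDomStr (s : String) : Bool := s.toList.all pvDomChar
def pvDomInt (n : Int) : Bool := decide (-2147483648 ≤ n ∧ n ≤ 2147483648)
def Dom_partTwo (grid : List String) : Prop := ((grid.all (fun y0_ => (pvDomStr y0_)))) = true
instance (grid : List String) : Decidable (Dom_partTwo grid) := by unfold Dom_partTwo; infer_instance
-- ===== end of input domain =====

-- B replaces A's memoized top-down recursion with a bottom-up row-by-row DP sweep (alternative decomposition, same cost).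


-- ===== PORT A =====
-- next((r, line.find('S')) for r, line in enumerate(grid) if 'S' in line); none = StopIteration (excluded by Pre_)
def pvFindStart (grid : List String) : Option (Int × Int) :=
  ((PySem.List.enumerate grid 0).find? (fun p => PySem.Str.isIn "S" p.2)).map
    (fun p => (p.1, PySem.Str.find p.2 "S"))

-- the memoized count_timelines(row, col); .getD ' ' stands where Python would raise IndexError (excluded by Pre_)
def pvCountA (grid : List String) (row col : Int) : Int :=
  if row ≥ (grid.length : Int) then 1
  else  -- cell = grid[row][col]; comparison inlined
    if (PySem.Str.pyGet? (PySem.List.pyGetD grid row "") col).getD ' ' = '^' then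
      (if col > 0 then pvCountA grid (row + 1) (col - 1) else 0)
      + (if col < PySem.Str.len (PySem.List.pyGetD grid 0 "") - 1 then pvCountA grid (row + 1) (col + 1) else 0)
    else pvCountA grid (row + 1) col
termination_by ((grid.length : Int) - row).toNat
decreasing_by all_goals omega

def partTwo (grid : List String) : Int :=
  match pvFindStart grid with
  | none => 0  -- Python raises StopIteration here; excluded by Pre_
  | some (sr, sc) => pvCountA grid (sr + 1) sc

-- ===== PORT B =====
-- one DP step: from the counts dp for the row below, build the counts for row `line`
def pvStepB (width : Int) (dp : List Int) (line : String) : List Int :=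
  (PySem.List.pyRange 0 width 1).map (fun col =>
    if col < PySem.Str.len line ∧ (PySem.Str.pyGet? line col).getD ' ' = '^' then
      (if col > 0 then PySem.List.pyGetD dp (col - 1) 0 else 0)
      + (if col < width - 1 then PySem.List.pyGetD dp (col + 1) 0 else 0)
    else PySem.List.pyGetD dp col 0)

def partTwo_alt (grid : List String) : Int :=
  match pvFindStart grid with
  | none => 0  -- Python raises StopIteration here; excluded by Pre_
  | some (sr, sc) =>
    let width := PySem.Str.len (PySem.List.pyGetD grid 0 "")
    let dp0 : List Int := List.replicate width.toNat 1
    let dp := ((PySem.List.pyRange (sr + 1) (grid.length : Int) 1).reverse).foldl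
      (fun dp row => pvStepB width dp (PySem.List.pyGetD grid row "")) dp0
    PySem.List.pyGetD dp sc 0

-- ===== PRECONDITION & SPEC =====
-- Pre_ excludes: grids with no 'S' (A raises StopIteration); grids whose first 'S' column is not below
-- len(grid[0]) (B's final dp[start_col] raises IndexError there); and grids where some row below the 'S' row
-- is too short to cover the cone of columns A's recursion could reach, on which A may raise IndexError —
-- on those of them where A happens to return (the short row unreached), B returns the same value.
def Pre_partTwo (grid : List String) : Prop :=
  grid.any (fun s => PySem.Str.isIn "S" s) = true ∧
  PySem.Str.find ((grid.find? (fun s => PySem.Str.isIn "S" s)).getD "") "S" <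
    PySem.Str.len (grid.headD "") ∧
  ∀ p ∈ PySem.List.enumerate ((grid.dropWhile (fun s => !PySem.Str.isIn "S" s)).tail) 1,
    min (PySem.Str.len (grid.headD ""))
        (PySem.Str.find ((grid.find? (fun s => PySem.Str.isIn "S" s)).getD "") "S" + p.1)
      ≤ PySem.Str.len p.2
instance (grid : List String) : Decidable (Pre_partTwo grid) := by unfold Pre_partTwo; infer_instance

def pvWitness_partTwo : List String := ["..S.", ".^^.", "....", "^..^"]

def Spec_partTwo (grid : List String) (out : Int) : Prop := out = partTwo_alt grid
instance (grid : List String) (out : Int) : Decidable (Spec_partTwo grid out) := by unfold Spec_partTwo; infer_instance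

-- ===== CLAIM (what is proved, stated in full; the proofs are below) =====
def Claim_equal_partTwo : Prop := ∀ (grid : List String), Dom_partTwo grid → Pre_partTwo grid → Spec_partTwo grid (partTwo grid)

-- ===== LEMMAS AND PROOFS =====

-- proof helper: pvDpFor grid width r = the per-column timeline counts for a particle entering row r
def pvDpFor (grid : List String) (width : Int) (r : Int) : List Int :=
  if r ≥ (grid.length : Int) then List.replicate width.toNat 1
  else pvStepB width (pvDpFor grid width (r + 1)) (PySem.List.pyGetD grid r "")
termination_by ((grid.length : Int) - r).toNat
decreasing_by all_goals omega

-- B's reversed-range fold computes pvDpFor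
theorem pvFold (grid : List String) (width : Int) (n : Nat) :
    ∀ (r : Int), ((grid.length : Int) - r).toNat = n →
    ((PySem.List.pyRange r (grid.length : Int) 1).reverse).foldl
      (fun dp row => pvStepB width dp (PySem.List.pyGetD grid row "")) (List.replicate width.toNat 1)
      = pvDpFor grid width r := by
  induction n with
  | zero =>
    intro r h
    have hle : (grid.length : Int) ≤ r := by omega
    rw [PySem.List.pyRange_one_eq_nil hle, pvDpFor, if_pos hle]
    rfl
  | succ n ih =>
    intro r h
    have hlt : r < (grid.length : Int) := by omega
    rw [PySem.List.pyRange_one_cons hlt]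
    simp only [List.reverse_cons, List.foldl_append, List.foldl_cons, List.foldl_nil]
    rw [ih (r + 1) (by omega), eq_comm, pvDpFor, if_neg (by omega)]

-- DP invariant: on a rectangular grid each dp entry equals A's memoized count
theorem pvInv (grid : List String) (w : Nat)
    (h0 : PySem.Str.len (PySem.List.pyGetD grid 0 "") = (w : Int)) (n : Nat) :
    ∀ (r c : Int), ((grid.length : Int) - r).toNat = n → 0 ≤ r → 0 ≤ c → c < (w : Int) →
    PySem.List.pyGetD (pvDpFor grid (w : Int) r) c 0 = pvCountA grid r c := by
  induction n with
  | zero =>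
    intro r c h hr hc hcw
    have hle : (grid.length : Int) ≤ r := by omega
    rw [pvDpFor, pvCountA, if_pos hle, if_pos hle]
    rw [PySem.List.pyGetD_eq_getElem _ 0 hc (by simp; omega)]
    simp
  | succ n ih =>
    intro r c h hr hc hcw
    have hnge : ¬ ((grid.length : Int) ≤ r) := by omega
    obtain ⟨k, rfl, hck⟩ : ∃ k : Nat, c = (k : Int) ∧ k < w := ⟨c.toNat, by omega, by omega⟩
    rw [pvDpFor, if_neg hnge, pvStepB, PySem.List.pyGetD_map_pyRange _ w k 0 hck,
      pvCountA, if_neg hnge, h0]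
    by_cases hcell : (PySem.Str.pyGet? (PySem.List.pyGetD grid r "") (k : Int)).getD ' ' = '^'
    · have hcl : (k : Int) < PySem.Str.len (PySem.List.pyGetD grid r "") := by
        by_contra hge
        rw [PySem.Str.len_eq] at hge
        rw [PySem.Str.pyGet?_natCast,
          List.getElem?_eq_none (by omega : (PySem.List.pyGetD grid r "").toList.length ≤ k)] at hcell
        exact absurd hcell (by decide)
      rw [if_pos ⟨hcl, hcell⟩, if_pos hcell]
      congr 1
      · split_ifs with hpos
        · exact ih (r + 1) ((k : Int) - 1) (by omega) (by omega) (by omega) (by omega)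
        · rfl
      · split_ifs with hlt2
        · exact ih (r + 1) ((k : Int) + 1) (by omega) (by omega) (by omega) (by omega)
        · rfl
    · rw [if_neg (fun hh => hcell hh.2), if_neg hcell]
      exact ih (r + 1) (k : Int) (by omega) (by omega) (by omega) (by omega)

-- find? over enumerate, projected to the element, is find? over the list
theorem pvFindEnum (xs : List String) (q : String → Bool) : ∀ (s : Int),
    ((PySem.List.enumerate xs s).find? (fun p => q p.2)).map (·.2) = xs.find? q := by
  induction xs with
  | nil => intro s; rfl
  | cons a t ih =>
    intro s
    rw [PySem.List.enumerate_cons]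
    by_cases hq : q a
    · simp [List.find?_cons_of_pos, hq]
    · rw [List.find?_cons_of_neg (l := PySem.List.enumerate t (s + 1)) (by simpa using hq),
        List.find?_cons_of_neg (by simpa using hq)]
      exact ih (s + 1)

-- grid[0] with default "" is headD ""
theorem pvGet0 (grid : List String) : PySem.List.pyGetD grid 0 "" = grid.headD "" := by
  cases grid with
  | nil => rfl
  | cons a t => rw [PySem.List.pyGetD_eq_getElem _ _ (by omega) (by simp)]; rfl

-- the start search succeeds under Pre_ and yields in-bounds coordinates
theorem pvStart (grid : List String) (hpre : Pre_partTwo grid) :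
    ∃ (sr sc : Int), pvFindStart grid = some (sr, sc) ∧ 0 ≤ sr ∧ 0 ≤ sc ∧
      sc < PySem.Str.len (PySem.List.pyGetD grid 0 "") := by
  obtain ⟨hany, hcol, -⟩ := hpre
  obtain ⟨s, hs, hsS⟩ := List.any_eq_true.mp hany
  have hsome : ((PySem.List.enumerate grid 0).find? (fun p => PySem.Str.isIn "S" p.2)).isSome := by
    rw [List.find?_isSome]
    obtain ⟨k, hk, hek⟩ := List.getElem_of_mem hs
    exact ⟨(0 + (k : Int), s), (PySem.List.mem_enumerate_iff _ _ _).mpr ⟨k, hk, by rw [hek]⟩, hsS⟩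
  obtain ⟨p, hp⟩ := Option.isSome_iff_exists.mp hsome
  have hptrue : PySem.Str.isIn "S" p.2 = true := by simpa using List.find?_some hp
  obtain ⟨k', hk', hpk⟩ := (PySem.List.mem_enumerate_iff _ _ _).mp (List.mem_of_find?_eq_some hp)
  have hfq : grid.find? (fun s => PySem.Str.isIn "S" s) = some p.2 := by
    rw [← pvFindEnum grid _ 0, hp]; rfl
  have hfnn : 0 ≤ PySem.Str.find p.2 "S" :=
    (PySem.Str.find_nonneg_iff _ _).mpr ((PySem.Str.isIn_iff_infix _ _).mp hptrue)
  rw [hfq] at hcol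
  rw [pvGet0]
  exact ⟨p.1, PySem.Str.find p.2 "S", by unfold pvFindStart; rw [hp]; rfl,
    by rw [hpk]; simp, hfnn, by simpa using hcol⟩

-- ===== VERDICT (by name: the statement is the Claim_ definition above) =====
theorem partTwo_spec : Claim_equal_partTwo := by
  intro grid _ hpre
  unfold Spec_partTwo
  obtain ⟨sr, sc, hfind, hsr, hsc, hscw⟩ := pvStart grid hpre
  have hne : grid ≠ [] := by
    obtain ⟨s, hs, -⟩ := List.any_eq_true.mp hpre.1
    intro hnil; rw [hnil] at hs; simp at hs
  have hmem0 : PySem.List.pyGetD grid 0 "" ∈ grid := by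
    rw [PySem.List.pyGetD_eq_getElem _ _ (by omega) (by exact_mod_cast List.length_pos_iff.mpr hne)]
    exact List.getElem_mem _
  have h0 : PySem.Str.len (PySem.List.pyGetD grid 0 "") =
      (((PySem.List.pyGetD grid 0 "").toList.length : Nat) : Int) := PySem.Str.len_eq _
  set w : Nat := (PySem.List.pyGetD grid 0 "").toList.length with hw
  simp only [partTwo, partTwo_alt, hfind]
  rw [h0]
  rw [pvFold grid (w : Int) ((grid.length : Int) - (sr + 1)).toNat (sr + 1) rfl]
  rw [h0] at hscw
  exact (pvInv grid w h0 ((grid.length : Int) - (sr + 1)).toNat (sr + 1) sc rfl (by omega) hsc hscw).symm
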